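-- pv_equiv track=rewrite | github.com/marikie/EvoSubster | last/collect_run_summary.py | evaluate_genus_patterns
-- ===== SOURCE A (Python) =====
-- from typing import Dict, Iterable, List, Optional, Set, Tuple
--
-- def extract_genus_label(metadata_entry: dict) -> Optional[str]:
--     candidates = [
--         metadata_entry.get("raw_organism_name"),
--         metadata_entry.get("ncbi_full_name"),
--         metadata_entry.get("directory_name"),
--         metadata_entry.get("short_name"),
--     ]
--     for candidate in candidates:
--         if not candidate:
--             continue
--         sanitized = candidate.replace("_", " ").strip()
--         if not sanitized:
--             continue
--         token = sanitized.split()[0]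
--         if token:
--             return token
--     return None
--
-- def evaluate_genus_patterns(
--     slot_map: Dict[str, dict]
-- ) -> Tuple[Optional[Dict[str, bool]], List[str]]:
--     issues: List[str] = []
--     required_slots = ("org1", "org2", "org3")
--     genus_values: Dict[str, str] = {}
--
--     for slot in required_slots:
--         entry = slot_map.get(slot)
--         if not entry:
--             issues.append(f"{slot}: Missing metadata entry for genus evaluation.")
--             return None, issues
--         genus_label = extract_genus_label(entry)
--         if not genus_label:
--             issues.append(f"{slot}: Unable to derive genus from metadata.")
--             return None, issues
--         genus_values[slot] = genus_label.lower()
--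
--     pattern1 = (
--         genus_values["org1"] != genus_values["org2"]
--         and genus_values["org1"] != genus_values["org3"]
--         and genus_values["org2"] == genus_values["org3"]
--     )
--     pattern3 = (
--         genus_values["org1"] == genus_values["org2"]
--         and genus_values["org2"] == genus_values["org3"]
--     )
--     pattern4 = (
--         genus_values["org1"] != genus_values["org2"]
--         and genus_values["org1"] != genus_values["org3"]
--         and genus_values["org2"] != genus_values["org3"]
--     )
--     pattern5 = (
--         (
--             genus_values["org1"] != genus_values["org2"]
--             and genus_values["org1"] == genus_values["org3"]
--             and genus_values["org2"] != genus_values["org3"]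
--         )
--         or (
--             genus_values["org1"] == genus_values["org2"]
--             and genus_values["org1"] != genus_values["org3"]
--             and genus_values["org2"] != genus_values["org3"]
--         )
--     )
--
--     patterns = {
--         "pattern1": pattern1,
--         "pattern3": pattern3,
--         "pattern4": pattern4,
--         "pattern5": pattern5,
--     }
--     return patterns, issues
-- ===== SOURCE B (Python) =====
-- from typing import Dict, List, Optional, Tuple
--
--
-- def _first_genus(entry: dict) -> Optional[str]:
--     for key in ("raw_organism_name", "ncbi_full_name", "directory_name", "short_name"):
--         tokens = (entry.get(key) or "").replace("_", " ").split()
--         if tokens: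
--             return tokens[0]
--     return None
--
--
-- def evaluate_genus_patterns(
--     slot_map: Dict[str, dict]
-- ) -> Tuple[Optional[Dict[str, bool]], List[str]]:
--     genus: List[str] = []
--     for slot in ("org1", "org2", "org3"):
--         entry = slot_map.get(slot)
--         if not entry:
--             return None, [f"{slot}: Missing metadata entry for genus evaluation."]
--         label = _first_genus(entry)
--         if label is None:
--             return None, [f"{slot}: Unable to derive genus from metadata."]
--         genus.append(label.lower())
--
--     g1, g2, g3 = genus
--     distinct = len(set(genus))
--     if distinct == 1:
--         chosen = "pattern3"
--     elif distinct == 3: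
--         chosen = "pattern4"
--     elif g2 == g3:
--         chosen = "pattern1"
--     else:
--         chosen = "pattern5"
--     return {name: name == chosen for name in ("pattern1", "pattern3", "pattern4", "pattern5")}, []
-- ===== Notes on version B (the rewrite author's own statement) =====
-- stated objective: simpler
-- what changed: B classifies the equality pattern by counting distinct lowered genus values (1 -> pattern3, 3 -> pattern4, 2 -> pattern1 if org1 is the singleton else pattern5) and builds the result dict by comprehension over one chosen key, and derives the genus token by scanning the metadata keys for the first non-empty token list, replacing A's four hand-written pairwise boolean formulas and its candidate/sanitize/strip/index cascade.
import Mathlib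
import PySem

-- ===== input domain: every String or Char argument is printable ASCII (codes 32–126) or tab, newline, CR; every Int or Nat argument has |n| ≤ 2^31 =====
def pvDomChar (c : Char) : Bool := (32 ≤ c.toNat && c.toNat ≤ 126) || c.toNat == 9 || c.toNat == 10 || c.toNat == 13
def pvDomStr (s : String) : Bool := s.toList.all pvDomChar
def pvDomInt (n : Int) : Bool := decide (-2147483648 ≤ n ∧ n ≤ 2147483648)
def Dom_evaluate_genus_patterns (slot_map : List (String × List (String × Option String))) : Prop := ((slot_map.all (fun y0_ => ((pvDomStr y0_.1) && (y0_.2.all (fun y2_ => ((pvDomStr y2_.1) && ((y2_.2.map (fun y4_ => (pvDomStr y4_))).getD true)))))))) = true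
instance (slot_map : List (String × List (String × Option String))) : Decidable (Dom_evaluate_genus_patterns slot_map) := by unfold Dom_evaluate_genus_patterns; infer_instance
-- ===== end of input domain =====

-- B replaces A's four hand-written pairwise-comparison pattern formulas by a distinct-count
-- classification (1 → pattern3, 3 → pattern4, 2 → pattern1/pattern5 by the g2 = g3 test) and a
-- comprehension-built result, and derives the genus token by scanning for the first non-empty
-- token list instead of A's candidate/sanitize/strip cascade; objective: simpler (same cost).

-- ===== PORT A =====
-- "for candidate in candidates: …" of extract_genus_label
def extractGenusLoop : List (Option String) → Option String
  | [] => none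
  | c :: rest =>
    if c = none ∨ c = some "" then extractGenusLoop rest        -- "if not candidate: continue"
    else
      let sanitized := PySem.Str.strip (PySem.Str.replace (c.getD "") "_" " ")
      if sanitized = "" then extractGenusLoop rest              -- "if not sanitized: continue"
      else
        -- sanitized.split()[0]: split() of a non-empty stripped string is never empty, so the
        -- IndexError branch is unreachable; pyGetD's "" default is never returned (and would be
        -- rejected by the "if token" test below anyway).
        let token := PySem.List.pyGetD (PySem.Str.split₀ sanitized) 0 ""
        if token ≠ "" then some token else extractGenusLoop rest

def extract_genus_label (entry : PySem.Dict String (Option String)) : Option String :=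
  extractGenusLoop
    [(entry.get? "raw_organism_name").join,
     (entry.get? "ncbi_full_name").join,
     (entry.get? "directory_name").join,
     (entry.get? "short_name").join]

-- "for slot in required_slots: …" building genus_values (inl = the early 'return None, issues')
def collectGenusValues (slot_map : List (String × List (String × Option String))) :
    List String → PySem.Dict String String → Sum (List String) (PySem.Dict String String)
  | [], gv => Sum.inr gv
  | slot :: rest, gv =>
    match (PySem.Dict.mk slot_map).get? slot with
    | none => Sum.inl [slot ++ ": Missing metadata entry for genus evaluation."]
    | some entry =>
      if entry = [] then Sum.inl [slot ++ ": Missing metadata entry for genus evaluation."]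
      else
        match extract_genus_label (PySem.Dict.mk entry) with
        | none => Sum.inl [slot ++ ": Unable to derive genus from metadata."]
        | some g =>
          if g = "" then Sum.inl [slot ++ ": Unable to derive genus from metadata."]
          else collectGenusValues slot_map rest (gv.insert slot (PySem.Str.lower g))

def evaluate_genus_patterns (slot_map : List (String × List (String × Option String))) :
    (Option (List (String × Bool))) × List String :=
  match collectGenusValues slot_map ["org1", "org2", "org3"] PySem.Dict.empty with
  | Sum.inl issues => (none, issues)
  | Sum.inr gv =>
    -- genus_values["orgN"]: each key was inserted by the loop, so KeyError is unreachable
    let g1 := (gv.get? "org1").getD ""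
    let g2 := (gv.get? "org2").getD ""
    let g3 := (gv.get? "org3").getD ""
    let pattern1 := (!(g1 == g2)) && (!(g1 == g3)) && (g2 == g3)
    let pattern3 := (g1 == g2) && (g2 == g3)
    let pattern4 := (!(g1 == g2)) && (!(g1 == g3)) && (!(g2 == g3))
    let pattern5 := ((!(g1 == g2)) && (g1 == g3) && (!(g2 == g3)))
                 || ((g1 == g2) && (!(g1 == g3)) && (!(g2 == g3)))
    (some [("pattern1", pattern1), ("pattern3", pattern3),
           ("pattern4", pattern4), ("pattern5", pattern5)], [])

-- ===== PORT B =====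
-- "for key in (…): tokens = (entry.get(key) or "").replace("_", " ").split(); if tokens: …"
def firstGenusLoop (entry : PySem.Dict String (Option String)) : List String → Option String
  | [] => none
  | key :: rest =>
    match PySem.Str.split₀ (PySem.Str.replace (((entry.get? key).join).getD "") "_" " ") with
    | [] => firstGenusLoop entry rest
    | t :: _ => some t

def first_genus (entry : PySem.Dict String (Option String)) : Option String :=
  firstGenusLoop entry ["raw_organism_name", "ncbi_full_name", "directory_name", "short_name"]

-- B's slot loop appending the lowered labels (inl = the early 'return None, [...]')
def collectGenusList (slot_map : List (String × List (String × Option String))) :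
    List String → List String → Sum (List String) (List String)
  | [], acc => Sum.inr acc
  | slot :: rest, acc =>
    match (PySem.Dict.mk slot_map).get? slot with
    | none => Sum.inl [slot ++ ": Missing metadata entry for genus evaluation."]
    | some entry =>
      if entry = [] then Sum.inl [slot ++ ": Missing metadata entry for genus evaluation."]
      else
        match first_genus (PySem.Dict.mk entry) with
        | none => Sum.inl [slot ++ ": Unable to derive genus from metadata."]
        | some label => collectGenusList slot_map rest (acc ++ [PySem.Str.lower label])

def evaluate_genus_patterns_alt (slot_map : List (String × List (String × Option String))) :
    (Option (List (String × Bool))) × List String :=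
  match collectGenusList slot_map ["org1", "org2", "org3"] [] with
  | Sum.inl issues => (none, issues)
  | Sum.inr genus =>
    match genus with
    | [g1, g2, g3] =>
      let distinct := (PySem.Set.ofList [g1, g2, g3]).length     -- len(set(genus))
      let chosen : String :=
        if distinct = 1 then "pattern3"
        else if distinct = 3 then "pattern4"
        else if g2 = g3 then "pattern1"
        else "pattern5"
      (some (["pattern1", "pattern3", "pattern4", "pattern5"].map
               (fun name => (name, name == chosen))), [])
    | _ => (none, [])   -- unreachable: the loop over three slots yields exactly three values

-- ===== PRECONDITION & SPEC =====
def Spec_evaluate_genus_patterns (slot_map : List (String × List (String × Option String))) (out : (Option (List (String × Bool))) × List String) : Prop := out = evaluate_genus_patterns_alt slot_map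
instance (slot_map : List (String × List (String × Option String))) (out : (Option (List (String × Bool))) × List String) : Decidable (Spec_evaluate_genus_patterns slot_map out) := by unfold Spec_evaluate_genus_patterns; infer_instance

-- ===== CLAIM (what is proved, stated in full; the proofs are below) =====
def Claim_equal_evaluate_genus_patterns : Prop := ∀ (slot_map : List (String × List (String × Option String))), Dom_evaluate_genus_patterns slot_map → Spec_evaluate_genus_patterns slot_map (evaluate_genus_patterns slot_map)

-- ===== LEMMAS AND PROOFS =====

-- split₀.go ignores a purely-whitespace remainder
theorem split0_go_all_space (s : List Char) (cur : List Char) (acc : List (List Char))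
    (h : s.all PySem.Chars.isspace) :
    PySem.Chars.split₀.go s cur acc = PySem.Chars.split₀.go [] cur acc := by
  induction s generalizing cur acc with
  | nil => rfl
  | cons c rest ih =>
    simp only [List.all_cons, Bool.and_eq_true] at h
    simp only [PySem.Chars.split₀.go, h.1, if_true]
    by_cases hc : cur.isEmpty <;>
      simp only [hc, if_true, Bool.false_eq_true, if_false] <;>
      rw [ih _ _ h.2] <;>
      simp [PySem.Chars.split₀.go]

theorem split0_go_append_space (m s : List Char) (cur : List Char) (acc : List (List Char))
    (h : s.all PySem.Chars.isspace) :
    PySem.Chars.split₀.go (m ++ s) cur acc = PySem.Chars.split₀.go m cur acc := by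
  induction m generalizing cur acc with
  | nil => simpa using split0_go_all_space s cur acc h
  | cons c rest ih =>
    simp only [List.cons_append, PySem.Chars.split₀.go]
    split_ifs <;> rw [ih]

theorem split0_go_lstrip (l : List Char) (acc : List (List Char)) :
    PySem.Chars.split₀.go (List.dropWhile PySem.Chars.isspace l) [] acc
      = PySem.Chars.split₀.go l [] acc := by
  induction l with
  | nil => rfl
  | cons c rest ih =>
    by_cases hc : PySem.Chars.isspace c
    · rw [List.dropWhile_cons_of_pos hc, ih]
      simp [PySem.Chars.split₀.go, hc]
    · rw [List.dropWhile_cons_of_neg hc]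

theorem chars_split0_strip (l : List Char) :
    PySem.Chars.split₀ (PySem.Chars.strip l) = PySem.Chars.split₀ l := by
  unfold PySem.Chars.split₀ PySem.Chars.strip PySem.Chars.rstrip
  set z := PySem.Chars.lstrip l with hz
  have hdecomp : z = (List.dropWhile PySem.Chars.isspace z.reverse).reverse
      ++ (List.takeWhile PySem.Chars.isspace z.reverse).reverse := by
    apply List.reverse_injective
    simp only [List.reverse_append, List.reverse_reverse]
    exact (List.takeWhile_append_dropWhile).symm
  have hall : (List.takeWhile PySem.Chars.isspace z.reverse).reverse.all PySem.Chars.isspace := by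
    simp only [List.all_reverse, List.all_eq_true]
    intro x hx
    exact List.mem_takeWhile_imp hx
  calc PySem.Chars.split₀.go (List.dropWhile PySem.Chars.isspace z.reverse).reverse [] []
      = PySem.Chars.split₀.go z [] [] := by
        conv_rhs => rw [hdecomp]
        rw [split0_go_append_space _ _ _ _ hall]
    _ = PySem.Chars.split₀.go l [] [] := by rw [hz]; exact split0_go_lstrip l []

theorem split0_go_ne_nil (s : List Char) (cur : List Char) (acc : List (List Char))
    (hacc : ∀ t ∈ acc, t ≠ ([] : List Char)) :
    ∀ t ∈ PySem.Chars.split₀.go s cur acc, t ≠ ([] : List Char) := by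
  induction s generalizing cur acc with
  | nil =>
    intro t ht
    simp only [PySem.Chars.split₀.go] at ht
    by_cases hc : cur.isEmpty
    · simp [hc] at ht; exact hacc _ (by simpa using ht)
    · simp [hc] at ht
      rcases ht with h | h
      · exact hacc _ h
      · subst h; simp only [List.isEmpty_iff] at hc; simpa using hc
  | cons c rest ih =>
    intro t ht
    simp only [PySem.Chars.split₀.go] at ht
    by_cases hsp : PySem.Chars.isspace c
    · simp only [hsp, if_true] at ht
      by_cases hc : cur.isEmpty
      · simp only [hc, if_true] at ht; exact ih _ _ hacc t ht
      · simp only [hc, Bool.false_eq_true, if_false] at ht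
        refine ih _ _ ?_ t ht
        intro u hu
        rcases List.mem_cons.mp hu with h | h
        · subst h; simp only [List.isEmpty_iff] at hc; simpa using hc
        · exact hacc _ h
    · simp only [hsp, Bool.false_eq_true, if_false] at ht
      exact ih _ _ hacc t ht

theorem chars_split0_mem_ne_nil (l : List Char) :
    ∀ t ∈ PySem.Chars.split₀ l, t ≠ ([] : List Char) :=
  split0_go_ne_nil l [] [] (by simp)

-- s.strip().split() = s.split()
theorem str_split0_strip (s : String) :
    PySem.Str.split₀ (PySem.Str.strip s) = PySem.Str.split₀ s := by
  unfold PySem.Str.split₀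
  rw [show (PySem.Str.strip s).toList = PySem.Chars.strip s.toList from PySem.Str.toList_strip s,
    chars_split0_strip]

-- s.split() never yields an empty token
theorem str_split0_mem_ne_empty (s t : String) (h : t ∈ PySem.Str.split₀ s) : t ≠ "" := by
  unfold PySem.Str.split₀ at h
  rcases List.mem_map.mp h with ⟨cs, hcs, rfl⟩
  have hne := chars_split0_mem_ne_nil s.toList cs hcs
  intro hcontra
  apply hne
  have hlist : (String.ofList cs).toList = cs := by simp
  rw [hcontra] at hlist
  simpa using hlist.symm

-- one candidate of A's cascade behaves exactly like one key of B's token scan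
theorem step_eq (c : Option String) (rA rB : Option String) (h : rA = rB) :
    (if c = none ∨ c = some "" then rA
     else
       let sanitized := PySem.Str.strip (PySem.Str.replace (c.getD "") "_" " ")
       if sanitized = "" then rA
       else
         let token := PySem.List.pyGetD (PySem.Str.split₀ sanitized) 0 ""
         if token ≠ "" then some token else rA)
  = (match PySem.Str.split₀ (PySem.Str.replace (c.getD "") "_" " ") with
     | [] => rB
     | t :: _ => some t) := by
  subst h
  have hempty : PySem.Str.split₀ (PySem.Str.replace "" "_" " ") = [] := by decide
  rcases c with _ | s
  · simp [hempty]
  · by_cases hs : s = ""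
    · subst hs; simp [hempty]
    · simp only [Option.getD_some, reduceCtorEq, Option.some.injEq, hs, or_self, if_false]
      have hkey := str_split0_strip (PySem.Str.replace s "_" " ")
      cases hsp : PySem.Str.split₀ (PySem.Str.strip (PySem.Str.replace s "_" " ")) with
      | nil =>
        rw [hsp] at hkey
        rw [← hkey]
        by_cases hstrip : PySem.Str.strip (PySem.Str.replace s "_" " ") = "" <;>
          simp [hstrip, PySem.List.pyGetD, PySem.List.pyGet?]
      | cons t ts =>
        rw [hsp] at hkey
        rw [← hkey]
        have hstrip : PySem.Str.strip (PySem.Str.replace s "_" " ") ≠ "" := by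
          intro hc
          rw [hc, show PySem.Str.split₀ "" = [] from by decide] at hsp
          exact List.cons_ne_nil t ts hsp.symm
        have ht : t ≠ "" :=
          str_split0_mem_ne_empty _ t (by rw [hsp]; exact List.mem_cons_self ..)
        simp [hstrip, ht]

theorem loops_eq (entry : PySem.Dict String (Option String)) (keys : List String) :
    extractGenusLoop (keys.map (fun k => (entry.get? k).join)) = firstGenusLoop entry keys := by
  induction keys with
  | nil => rfl
  | cons k rest ih =>
    rw [List.map_cons]
    simp only [extractGenusLoop, firstGenusLoop]
    exact step_eq _ _ _ ih

theorem extract_eq (entry : PySem.Dict String (Option String)) :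
    extract_genus_label entry = first_genus entry :=
  loops_eq entry ["raw_organism_name", "ncbi_full_name", "directory_name", "short_name"]

theorem extractGenusLoop_ne_empty (cs : List (Option String)) (t : String)
    (h : extractGenusLoop cs = some t) : t ≠ "" := by
  induction cs with
  | nil => simp [extractGenusLoop] at h
  | cons c rest ih =>
    simp only [extractGenusLoop] at h
    split_ifs at h with h1 h2 h3
    · exact ih h
    · exact ih h
    · obtain rfl : _ = t := Option.some.inj h
      exact h3
    · exact ih h

theorem first_genus_ne_empty (entry : PySem.Dict String (Option String)) (t : String)
    (h : first_genus entry = some t) : t ≠ "" := by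
  rw [← extract_eq] at h
  exact extractGenusLoop_ne_empty _ _ h

-- A's four pairwise-comparison formulas = B's distinct-count classification
theorem patterns_eq (g1 g2 g3 : String) :
    ([("pattern1", (!(g1 == g2)) && (!(g1 == g3)) && (g2 == g3)),
      ("pattern3", (g1 == g2) && (g2 == g3)),
      ("pattern4", (!(g1 == g2)) && (!(g1 == g3)) && (!(g2 == g3))),
      ("pattern5", ((!(g1 == g2)) && (g1 == g3) && (!(g2 == g3)))
                 || ((g1 == g2) && (!(g1 == g3)) && (!(g2 == g3))))] : List (String × Bool))
    = (["pattern1", "pattern3", "pattern4", "pattern5"].map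
        (fun name => (name,
          name == (if (PySem.Set.ofList [g1, g2, g3]).length = 1 then "pattern3"
                   else if (PySem.Set.ofList [g1, g2, g3]).length = 3 then "pattern4"
                   else if g2 = g3 then "pattern1"
                   else "pattern5")))) := by
  by_cases h12 : g1 = g2
  · by_cases h23 : g2 = g3
    · subst h12; subst h23
      simp [PySem.Set.ofList, PySem.Set.add, PySem.Set.empty]
    · subst h12
      have h32 : ¬ g3 = g1 := fun h => h23 h.symm
      simp [PySem.Set.ofList, PySem.Set.add, PySem.Set.empty, h23, h32]
  · by_cases h23 : g2 = g3
    · subst h23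
      have h21 : ¬ g2 = g1 := fun h => h12 h.symm
      simp [PySem.Set.ofList, PySem.Set.add, PySem.Set.empty, h12, h21]
    · by_cases h13 : g1 = g3
      · subst h13
        have h21 : ¬ g2 = g1 := fun h => h12 h.symm
        simp [PySem.Set.ofList, PySem.Set.add, PySem.Set.empty, h12, h21]
      · have h21 : ¬ g2 = g1 := fun h => h12 h.symm
        have h31 : ¬ g3 = g1 := fun h => h13 h.symm
        have h32 : ¬ g3 = g2 := fun h => h23 h.symm
        simp [PySem.Set.ofList, PySem.Set.add, PySem.Set.empty, h12, h13, h23, h21, h31, h32]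

theorem eval_eq (sm : List (String × List (String × Option String))) :
    evaluate_genus_patterns sm = evaluate_genus_patterns_alt sm := by
  unfold evaluate_genus_patterns evaluate_genus_patterns_alt
  simp only [collectGenusValues, collectGenusList, extract_eq]
  cases h1 : (PySem.Dict.mk sm).get? "org1" with
  | none => rfl
  | some e1 =>
    by_cases he1 : e1 = []
    · simp [he1]
    · simp only [he1, if_false]
      cases hg1 : first_genus (PySem.Dict.mk e1) with
      | none => rfl
      | some l1 =>
        simp only [first_genus_ne_empty _ _ hg1, if_false]
        cases h2 : (PySem.Dict.mk sm).get? "org2" with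
        | none => rfl
        | some e2 =>
          by_cases he2 : e2 = []
          · simp [he2]
          · simp only [he2, if_false]
            cases hg2 : first_genus (PySem.Dict.mk e2) with
            | none => rfl
            | some l2 =>
              simp only [first_genus_ne_empty _ _ hg2, if_false]
              cases h3 : (PySem.Dict.mk sm).get? "org3" with
              | none => rfl
              | some e3 =>
                by_cases he3 : e3 = []
                · simp [he3]
                · simp only [he3, if_false]
                  cases hg3 : first_genus (PySem.Dict.mk e3) with
                  | none => rfl
                  | some l3 =>
                    simp only [first_genus_ne_empty _ _ hg3, if_false]
                    simp only [List.nil_append, List.cons_append, PySem.Dict.get?_insert,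
                      PySem.Dict.get?_empty]
                    simp only [String.reduceEq, reduceIte, Option.getD_some]
                    exact congrArg
                      (fun l => ((some l : Option (List (String × Bool))), ([] : List String)))
                      (patterns_eq _ _ _)

-- ===== VERDICT (by name: the statement is the Claim_ definition above) =====
theorem evaluate_genus_patterns_spec : Claim_equal_evaluate_genus_patterns := by
  intro slot_map _
  unfold Spec_evaluate_genus_patterns
  exact eval_eq slot_map
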